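-- pv_equiv track=rewrite | github.com/MinoruHirose/SymbolicMultipleZetaValues | Utilities.py | mono_dual
-- ===== SOURCE A (Python) =====
-- def mono_dual(ks):
--     assert type(ks)==list
--     assert ks[-1]>=2
--     ret = []
--     for k in ks[::-1]:
--         for _ in range(k-1):
--             ret.append(1)
--         ret[-1]+=1
--     return ret
-- ===== SOURCE B (Python) =====
-- def mono_dual(ks):
--     assert type(ks)==list
--     assert ks[-1]>=2
--     # encode as binary word: each k -> 1 followed by (k-1) zeros
--     word = []
--     for k in ks:
--         word.append(1)
--         word.extend([0]*(k-1))
--     # dual = reverse and flip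
--     conj = [1-b for b in reversed(word)]
--     # decode word back to index list
--     ret = []
--     for b in conj:
--         if b==1:
--             ret.append(1)
--         else:
--             ret[-1]+=1
--     return ret
-- ===== Notes on version B (the rewrite author's own statement) =====
-- stated objective: alternative
-- what changed: B computes the dual by the word picture: encode ks into a binary word (1 followed by k-1 zeros per entry), reverse-and-flip the word, then decode it back into an index list, instead of A's direct reversed loop that appends ones and bumps the tail.
import Mathlib
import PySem

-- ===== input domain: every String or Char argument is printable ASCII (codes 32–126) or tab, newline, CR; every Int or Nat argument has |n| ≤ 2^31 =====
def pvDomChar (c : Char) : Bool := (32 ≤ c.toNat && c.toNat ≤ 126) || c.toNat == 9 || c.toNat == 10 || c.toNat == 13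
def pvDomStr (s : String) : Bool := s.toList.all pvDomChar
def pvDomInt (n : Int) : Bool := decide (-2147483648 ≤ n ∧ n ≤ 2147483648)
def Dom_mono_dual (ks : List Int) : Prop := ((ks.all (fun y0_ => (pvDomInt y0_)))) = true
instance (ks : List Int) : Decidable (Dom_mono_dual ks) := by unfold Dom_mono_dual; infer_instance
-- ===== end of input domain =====

-- B replaces A's reversed append-and-bump loop by the binary-word view of the dual
-- (encode, reverse-and-flip, decode); same cost, different algorithm.

-- shared primitive: Python's `ret[-1] += 1` (increment the last element; [] untouched,
-- unreachable under Pre_)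
def pvIncLast : List Int → List Int
  | [] => []
  | [x] => [x + 1]
  | x :: y :: xs => x :: pvIncLast (y :: xs)

-- ===== PORT A =====
-- `for _ in range(k-1): ret.append(1)` appends max(k-1,0) ones; then `ret[-1]+=1`.
def mono_dual (ks : List Int) : List Int :=
  ks.reverse.foldl (fun ret k => pvIncLast (ret ++ List.replicate (k - 1).toNat 1)) []

-- ===== PORT B =====
-- encode: each k contributes a 1 then (k-1) zeros (`word.extend([0]*(k-1))`)
def pvWordStep (w : List Int) (k : Int) : List Int :=
  (w ++ [1]) ++ List.replicate (k - 1).toNat 0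

-- decode: a 1 starts a new entry, a 0 bumps the last one
def pvDecodeStep (ret : List Int) (b : Int) : List Int :=
  if b == 1 then ret ++ [1] else pvIncLast ret

def mono_dual_alt (ks : List Int) : List Int :=
  let word := ks.foldl pvWordStep []
  let conj := word.reverse.map (fun b => 1 - b)
  conj.foldl pvDecodeStep []

-- ===== PRECONDITION & SPEC =====
-- Pre_ excludes exactly the inputs where the Python A raises: [] (IndexError on ks[-1])
-- and ks[-1] < 2 (AssertionError); B carries the same asserts and raises there too.
def Pre_mono_dual (ks : List Int) : Prop := ks ≠ [] ∧ 2 ≤ ks.getLastD 0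
instance (ks : List Int) : Decidable (Pre_mono_dual ks) := by unfold Pre_mono_dual; infer_instance
def pvWitness_mono_dual : List Int := [3, 1, 2]

def Spec_mono_dual (ks : List Int) (out : List Int) : Prop := out = mono_dual_alt ks
instance (ks : List Int) (out : List Int) : Decidable (Spec_mono_dual ks out) := by unfold Spec_mono_dual; infer_instance

-- ===== CLAIM (what is proved, stated in full; the proofs are below) =====
def Claim_equal_mono_dual : Prop := ∀ (ks : List Int), Dom_mono_dual ks → Pre_mono_dual ks → Spec_mono_dual ks (mono_dual ks)

-- ===== LEMMAS AND PROOFS =====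

-- the encoding loop builds the flatMap of the per-entry segments
theorem pvWord_eq (ks : List Int) (w : List Int) :
    ks.foldl pvWordStep w = w ++ ks.flatMap (fun k => 1 :: List.replicate (k - 1).toNat 0) := by
  induction ks generalizing w with
  | nil => simp
  | cons k ks ih => simp [pvWordStep, ih, List.append_assoc]

-- folding over a flatMap = folding the per-segment folds
theorem pvFoldl_flatMap {α β γ : Type} (f : γ → α → γ) (g : β → List α) (l : List β) (a : γ) :
    (l.flatMap g).foldl f a = l.foldl (fun acc x => (g x).foldl f acc) a := by
  induction l generalizing a with
  | nil => rfl
  | cons x l ih => simp [List.flatMap_cons, List.foldl_append, ih]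

-- decoding a run of ones just appends them
theorem pvDecode_ones (m : Nat) (acc : List Int) :
    (List.replicate m (1 : Int)).foldl pvDecodeStep acc = acc ++ List.replicate m 1 := by
  induction m generalizing acc with
  | zero => simp
  | succ m ih =>
      simp [List.replicate_succ, pvDecodeStep, ih, List.append_assoc]

-- decoding one conjugated segment is exactly A's loop body
theorem pvDecode_seg (m : Nat) (acc : List Int) :
    (List.replicate m (1 : Int) ++ [0]).foldl pvDecodeStep acc
      = pvIncLast (acc ++ List.replicate m 1) := by
  simp [List.foldl_append, pvDecode_ones, pvDecodeStep]

-- reverse-and-flip of the whole encoded word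
theorem pvConj_word (ks : List Int) :
    ((ks.flatMap (fun k => (1 : Int) :: List.replicate (k - 1).toNat 0)).reverse.map
        (fun b => 1 - b))
      = ks.reverse.flatMap (fun k => List.replicate (k - 1).toNat (1 : Int) ++ [0]) := by
  induction ks with
  | nil => simp
  | cons k ks ih =>
      simp only [List.flatMap_cons, List.reverse_append, List.map_append, List.reverse_cons,
        List.flatMap_append, List.flatMap_nil, List.append_nil, List.reverse_replicate,
        List.map_replicate, List.map_cons, List.map_nil, ih]
      norm_num

-- ===== VERDICT (by name: the statement is the Claim_ definition above) =====
theorem mono_dual_spec : Claim_equal_mono_dual := by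
  intro ks _ _
  show mono_dual ks = mono_dual_alt ks
  unfold mono_dual mono_dual_alt
  rw [pvWord_eq]
  simp only [List.nil_append]
  rw [pvConj_word, pvFoldl_flatMap]
  refine Eq.symm (PySem.List.foldl_congr_mem _ _ _ _ ?_)
  intro acc k _
  exact pvDecode_seg _ acc
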